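-- pv_equiv track=rewrite | github.com/cauafsantosdev/Beecrowd | 2242.py | funny
-- ===== SOURCE A (Python) =====
-- def funny(laugh: str):
--     vowels = ["a", "e", "i", "o", "u"]
--     laugh = [i for i in laugh if i in vowels]
--     laugh = "".join(laugh)
--     reversed_laugh = laugh[::-1]
--
--     if laugh == reversed_laugh:
--         return "S"
--
--     return "N"
-- ===== SOURCE B (Python) =====
-- def funny(laugh: str):
--     vowels = "aeiou"
--
--     def check(s):
--         if len(s) < 2:
--             return True
--         if s[0] not in vowels:
--             return check(s[1:])
--         if s[-1] not in vowels:
--             return check(s[:-1])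
--         if s[0] != s[-1]:
--             return False
--         return check(s[1:-1])
--
--     return "S" if check(laugh) else "N"
-- ===== Notes on version B (the rewrite author's own statement) =====
-- stated objective: alternative
-- what changed: Instead of building the filtered vowel string and comparing it with its reverse, B recursively peels the string from both ends, skipping non-vowels and comparing the outermost vowels directly, never materialising the filtered string or its reverse.
import Mathlib
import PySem

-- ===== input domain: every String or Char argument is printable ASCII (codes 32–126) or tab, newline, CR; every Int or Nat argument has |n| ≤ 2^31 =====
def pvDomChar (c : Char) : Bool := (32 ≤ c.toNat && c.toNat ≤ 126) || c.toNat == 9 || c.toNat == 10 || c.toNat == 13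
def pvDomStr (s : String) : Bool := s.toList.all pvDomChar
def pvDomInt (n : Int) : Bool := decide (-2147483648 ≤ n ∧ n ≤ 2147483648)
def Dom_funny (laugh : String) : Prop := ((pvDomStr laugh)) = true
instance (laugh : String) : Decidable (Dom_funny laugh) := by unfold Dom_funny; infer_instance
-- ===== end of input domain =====

-- B replaces "filter vowels, join, compare with the reversed string" by a recursive
-- two-ended peel of the original string; return value only, no mutation involved.

-- ===== PORT A =====
def funny (laugh : String) : String :=
  let vowels : List Char := ['a', 'e', 'i', 'o', 'u']
  let l := laugh.toList.filter (fun i => vowels.contains i)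
  let reversed_laugh := l.reverse
  if l = reversed_laugh then "S" else "N"

-- ===== PORT B =====
def pvVowel (c : Char) : Bool := "aeiou".toList.contains c

-- Source B's inner 'check': peel both ends, skipping non-vowels (s[-1] via getLast, s[:-1]
-- via dropLast, s[1:-1] via dropLast of the tail — exact for nonempty lists).
def pvCheck : List Char → Bool
  | [] => true
  | [_] => true
  | c :: d :: rest =>
    if ¬ pvVowel c then pvCheck (d :: rest)
    else if ¬ pvVowel (rest.getLastD d) then pvCheck (c :: (d :: rest).dropLast)
    else if c ≠ rest.getLastD d then false
    else pvCheck (d :: rest).dropLast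
termination_by l => l.length
decreasing_by all_goals simp [List.length_dropLast]

def funny_alt (laugh : String) : String :=
  if pvCheck laugh.toList then "S" else "N"

-- ===== PRECONDITION & SPEC =====
def Spec_funny (laugh : String) (out : String) : Prop := out = funny_alt laugh
instance (laugh : String) (out : String) : Decidable (Spec_funny laugh out) := by unfold Spec_funny; infer_instance

-- ===== CLAIM (what is proved, stated in full; the proofs are below) =====
def Claim_equal_funny : Prop := ∀ (laugh : String), Dom_funny laugh → Spec_funny laugh (funny laugh)

-- ===== LEMMAS AND PROOFS =====

theorem pvVowel_eq (c : Char) :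
    (['a', 'e', 'i', 'o', 'u'] : List Char).contains c = pvVowel c := by
  simp [pvVowel]

-- the heart of the proof: pvCheck decides whether the vowel subsequence is a palindrome
theorem pvCheck_eq (s : List Char) :
    pvCheck s = decide (s.filter pvVowel = (s.filter pvVowel).reverse) := by
  match s with
  | [] => simp [pvCheck]
  | [c] =>
    by_cases h : pvVowel c = true <;> simp [pvCheck, List.filter, h]
  | c :: d :: rest =>
    obtain ⟨l, b, h⟩ : ∃ l b, d :: rest = l ++ [b] :=
      ⟨(d :: rest).dropLast, (d :: rest).getLast (by simp),
        (List.dropLast_append_getLast (by simp)).symm⟩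
    have hlen : l.length = rest.length := by
      have := congrArg List.length h; simp at this; omega
    have h1 : (d :: rest).getLast? = some b := by rw [h]; simp
    have hlast : rest.getLastD d = b := by
      simpa [List.getLast?_cons] using h1
    have hdrop : (d :: rest).dropLast = l := by
      rw [show (d :: rest) = l ++ [b] from h]; simp
    rw [pvCheck, hlast, hdrop]
    by_cases hc : pvVowel c = true
    · by_cases hb : pvVowel b = true
      · simp only [hc, hb, not_true, if_false, ite_not]
        by_cases hcb : c = b
        · subst hcb
          have ih := pvCheck_eq l
          simp only [ih, h, List.filter_cons, hc, List.filter_append,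
            List.filter_nil]
          simp [List.reverse_append]
        · have hX : (c :: (d :: rest)).filter pvVowel = c :: (l.filter pvVowel ++ [b]) := by
            simp [h, List.filter_append, hc, hb]
          have hne : c :: (l.filter pvVowel ++ [b]) ≠ (c :: (l.filter pvVowel ++ [b])).reverse := by
            simp only [List.reverse_cons, List.reverse_append, List.reverse_nil,
              List.nil_append, List.cons_append]
            intro hEq
            exact hcb (List.head_eq_of_cons_eq hEq)
          rw [if_neg hcb, hX, decide_eq_false hne]
      · simp only [hc, hb, not_true, if_false, if_true, Bool.not_eq_true]
        have ih := pvCheck_eq (c :: l)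
        rw [ih]
        have hX : (c :: (d :: rest)).filter pvVowel = (c :: l).filter pvVowel := by
          simp [h, List.filter_append, List.filter_cons, hb]
        rw [hX]
    · rw [if_pos hc]
      have ih := pvCheck_eq (d :: rest)
      rw [ih]
      have hX : (c :: (d :: rest)).filter pvVowel = (d :: rest).filter pvVowel := by
        simp [List.filter_cons, hc]
      rw [hX]
termination_by s.length
decreasing_by all_goals (simp_all; try omega)

-- ===== VERDICT (by name: the statement is the Claim_ definition above) =====
theorem funny_spec : Claim_equal_funny := by
  intro laugh _
  unfold Spec_funny funny funny_alt
  rw [pvCheck_eq]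
  simp only [pvVowel_eq, decide_eq_true_eq]
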